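-- pv_equiv track=rewrite | github.com/leihchen/leetcode | mac/main.py | consecutiveDecreasing
-- ===== SOURCE A (Python) =====
-- def consecutiveDecreasing(nums):
--     nums = [0] + nums
--     res = []
--     n = len(nums)
--     i = 0
--     while i < n:
--         start = i
--         while i < n and (nums[i-1] == nums[i] + 1):
--             i += 1
--         if start == i:
--             i += 1
--         else:
--             res.append(i - start + 1)
--     return res
-- ===== SOURCE B (Python) =====
-- def consecutiveDecreasing(nums):
--     aug = [0] + nums
--     n = len(aug)
--     # positions where the decreasing-by-one chain is broken (j=0 compares to aug[-1], as A does)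
--     breaks = [j for j in range(n) if aug[j - 1] != aug[j] + 1]
--     breaks.append(n)
--     res = []
--     prev = -1
--     for b in breaks:
--         if b - prev > 1:
--             res.append(b - prev)
--         prev = b
--     return res
-- ===== Notes on version B (the rewrite author's own statement) =====
-- stated objective: alternative
-- what changed: Instead of scanning for runs with an index-advancing inner loop (or any run counter), B computes the list of break positions where aug[j-1] != aug[j]+1 (keeping A's j=0 wraparound), appends a sentinel n, and reads each result off as the gap between consecutive break positions.
import Mathlib
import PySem

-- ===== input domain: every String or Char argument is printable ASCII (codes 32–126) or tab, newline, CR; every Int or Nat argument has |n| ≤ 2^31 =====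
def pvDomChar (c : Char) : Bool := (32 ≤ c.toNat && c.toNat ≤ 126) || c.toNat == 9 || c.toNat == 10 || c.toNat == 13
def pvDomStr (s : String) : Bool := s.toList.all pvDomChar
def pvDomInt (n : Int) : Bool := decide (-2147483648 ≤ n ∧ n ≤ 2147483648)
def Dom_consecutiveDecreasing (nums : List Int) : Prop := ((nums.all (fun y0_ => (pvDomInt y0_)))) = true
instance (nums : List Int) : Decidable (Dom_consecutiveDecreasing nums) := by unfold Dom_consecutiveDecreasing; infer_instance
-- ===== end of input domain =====

-- B replaces A's nested run-scanning loops by collecting break positions (where aug[j-1] != aug[j]+1, with A's j=0 wraparound), adding a sentinel, and emitting gaps between consecutive breaks; same O(n), alternative decomposition.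

-- shared primitive accessor; exact for the in-range (incl. -1) indices both programs use
def pvGet (l : List Int) (j : Int) : Int := (PySem.List.pyGet? l j).getD 0

-- ===== PORT A =====
-- inner while: advance i while i < n and nums[i-1] == nums[i] + 1
def cdInner (aug : List Int) (n i : Nat) : Nat :=
  if _h : i < n ∧ pvGet aug ((i : Int) - 1) = pvGet aug (i : Int) + 1 then
    cdInner aug n (i + 1)
  else i
termination_by n - i
decreasing_by omega

theorem cdInner_ge (aug : List Int) (n i : Nat) : i ≤ cdInner aug n i := by
  unfold cdInner
  split
  · exact le_trans (by omega) (cdInner_ge aug n (i + 1))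
  · exact le_refl i
termination_by n - i
decreasing_by rename_i h; omega

-- outer while loop
def cdOuter (aug : List Int) (n i : Nat) (res : List Int) : List Int :=
  if h : i < n then
    let start := i
    let i' := cdInner aug n i
    if hs : start = i' then cdOuter aug n (i' + 1) res
    else cdOuter aug n i' (res ++ [(i' : Int) - (start : Int) + 1])
  else res
termination_by n - i
decreasing_by
  · omega
  · have := cdInner_ge aug n i; omega

def consecutiveDecreasing (nums : List Int) : List Int :=
  let aug := 0 :: nums
  cdOuter aug aug.length 0 []

-- ===== PORT B =====
-- the break test at position j: chain NOT continued
def brkAt (aug : List Int) (j : Nat) : Bool :=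
  decide (pvGet aug ((j : Int) - 1) ≠ pvGet aug (j : Int) + 1)

-- one step of B's gap loop over break positions
def gapStep (st : List Int × Int) (b : Nat) : List Int × Int :=
  if (b : Int) - st.2 > 1 then (st.1 ++ [(b : Int) - st.2], (b : Int)) else (st.1, (b : Int))

def consecutiveDecreasing_alt (nums : List Int) : List Int :=
  let aug := 0 :: nums
  let n := aug.length
  let breaks := ((List.range n).filter (brkAt aug)) ++ [n]
  (breaks.foldl gapStep ([], (-1 : Int))).1

-- ===== PRECONDITION & SPEC =====
def Spec_consecutiveDecreasing (nums : List Int) (out : List Int) : Prop := out = consecutiveDecreasing_alt nums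
instance (nums : List Int) (out : List Int) : Decidable (Spec_consecutiveDecreasing nums out) := by unfold Spec_consecutiveDecreasing; infer_instance

-- ===== CLAIM (what is proved, stated in full; the proofs are below) =====
def Claim_equal_consecutiveDecreasing : Prop := ∀ (nums : List Int), Dom_consecutiveDecreasing nums → Spec_consecutiveDecreasing nums (consecutiveDecreasing nums)

-- ===== LEMMAS AND PROOFS =====

-- the "flag" (chain continued) at position j is the negation of the break test
def flagAt (aug : List Int) (j : Nat) : Bool :=
  decide (pvGet aug ((j : Int) - 1) = pvGet aug (j : Int) + 1)

-- reference run-length scan over the flags from index i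
def runScan : List Bool → Nat → List Int
  | [], run => if run ≠ 0 then [(run : Int) + 1] else []
  | f :: fs, run =>
    if f then runScan fs (run + 1)
    else if run ≠ 0 then ((run : Int) + 1) :: runScan fs 0 else runScan fs 0

def flagList (aug : List Int) (n i : Nat) : List Bool :=
  (List.range' i (n - i)).map (flagAt aug)

theorem flagList_cons (aug : List Int) (n i : Nat) (h : i < n) :
    flagList aug n i = flagAt aug i :: flagList aug n (i + 1) := by
  unfold flagList
  have : n - i = (n - (i + 1)) + 1 := by omega
  rw [this, List.range'_succ, List.map_cons]

theorem flagList_nil (aug : List Int) (n i : Nat) (h : ¬ i < n) :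
    flagList aug n i = [] := by
  unfold flagList
  have : n - i = 0 := by omega
  simp [this]

theorem cdInner_le (aug : List Int) (n i : Nat) (h : i ≤ n) : cdInner aug n i ≤ n := by
  unfold cdInner
  split
  · exact cdInner_le aug n (i + 1) (by omega)
  · exact h
termination_by n - i
decreasing_by rename_i h'; omega

theorem cdInner_stop (aug : List Int) (n i : Nat) :
    ¬ (cdInner aug n i < n ∧ flagAt aug (cdInner aug n i) = true) := by
  unfold cdInner
  split
  · exact cdInner_stop aug n (i + 1)
  · rename_i h
    simp only [flagAt, decide_eq_true_eq]
    exact h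
termination_by n - i
decreasing_by rename_i h; omega

theorem runScan_inner (aug : List Int) (n i run : Nat) :
    runScan (flagList aug n i) run
      = runScan (flagList aug n (cdInner aug n i)) (run + (cdInner aug n i - i)) := by
  rw [cdInner]
  split
  · rename_i h
    have hge := cdInner_ge aug n (i + 1)
    rw [flagList_cons aug n i h.1]
    have hf : flagAt aug i = true := by simp [flagAt, h.2]
    simp only [runScan, hf]
    rw [runScan_inner aug n (i + 1) (run + 1)]
    have harith : run + 1 + (cdInner aug n (i + 1) - (i + 1)) = run + (cdInner aug n (i + 1) - i) := by omega
    rw [harith]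
    simp
  · simp
termination_by n - i
decreasing_by rename_i h; omega

theorem cdOuter_eq (aug : List Int) (n i : Nat) (res : List Int) (hin : i ≤ n) :
    cdOuter aug n i res = res ++ runScan (flagList aug n i) 0 := by
  rw [cdOuter]
  split
  · rename_i h
    set i' := cdInner aug n i with hi'
    have hge : i ≤ i' := cdInner_ge aug n i
    have hle : i' ≤ n := cdInner_le aug n i hin
    have hstop := cdInner_stop aug n i
    rw [← hi'] at hstop
    have hscan := runScan_inner aug n i 0
    rw [← hi'] at hscan
    by_cases hs : i = i'
    · rw [dif_pos hs]
      have hf : flagAt aug i = false := by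
        rcases Bool.eq_false_or_eq_true (flagAt aug i) with hf | hf
        · exfalso
          apply hstop
          rw [← hs]
          exact ⟨h, hf⟩
        · exact hf
      rw [cdOuter_eq aug n (i' + 1) res (by omega)]
      rw [flagList_cons aug n i h, ← hs]
      simp [runScan, hf]
    · rw [dif_neg hs]
      rw [cdOuter_eq aug n i' (res ++ [(i' : Int) - (i : Int) + 1]) hle]
      rw [hscan]
      have hk : (0 : Nat) + (i' - i) = i' - i := by omega
      rw [hk]
      have hkpos : i' - i ≠ 0 := by omega
      have hval : ((i' - i : Nat) : Int) + 1 = (i' : Int) - (i : Int) + 1 := by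
        push_cast [Nat.cast_sub hge]; ring
      by_cases hn : i' < n
      · have hf : flagAt aug i' = false := by
          rcases Bool.eq_false_or_eq_true (flagAt aug i') with hf | hf
          · exact absurd ⟨hn, hf⟩ hstop
          · exact hf
        rw [flagList_cons aug n i' hn]
        simp [runScan, hf, hkpos, hval]
      · rw [flagList_nil aug n i' hn]
        simp [runScan, hkpos, hval]
  · rename_i h
    rw [flagList_nil aug n i h]
    simp [runScan]
termination_by n - i
decreasing_by
  · omega
  · have := cdInner_ge aug n i; omega

-- break positions from index i
def brkList (aug : List Int) (n i : Nat) : List Nat :=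
  (List.range' i (n - i)).filter (brkAt aug)

theorem brk_eq_not_flag (aug : List Int) (j : Nat) : brkAt aug j = !(flagAt aug j) := by
  simp [brkAt, flagAt]

theorem brkList_cons (aug : List Int) (n i : Nat) (h : i < n) :
    brkList aug n i
      = if flagAt aug i then brkList aug n (i + 1) else i :: brkList aug n (i + 1) := by
  unfold brkList
  have : n - i = (n - (i + 1)) + 1 := by omega
  rw [this, List.range'_succ, List.filter_cons, brk_eq_not_flag]
  cases flagAt aug i <;> simp

theorem brkList_nil (aug : List Int) (n i : Nat) (h : ¬ i < n) :
    brkList aug n i = [] := by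
  unfold brkList
  have : n - i = 0 := by omega
  simp [this]

-- B's gap fold over the breaks from i (plus sentinel n) equals runScan over the flags from i,
-- where the current run length is run and the last break was at (i - 1 - run)
theorem gapFold_eq_runScan (aug : List Int) (n i run : Nat) (res : List Int) (hin : i ≤ n)
    (hrun : run ≤ i) :
    ((brkList aug n i ++ [n]).foldl gapStep (res, (i : Int) - 1 - run)).1
      = res ++ runScan (flagList aug n i) run := by
  by_cases h : i < n
  · rw [brkList_cons aug n i h, flagList_cons aug n i h]
    cases hf : flagAt aug i with
    | true =>
      simp only [if_pos rfl, runScan, if_pos rfl]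
      have := gapFold_eq_runScan aug n (i + 1) (run + 1) res (by omega) (by omega)
      have harith : ((i + 1 : Nat) : Int) - 1 - ((run + 1 : Nat) : Int) = (i : Int) - 1 - run := by
        push_cast; ring
      rw [harith] at this
      exact this
    | false =>
      simp only [Bool.false_eq_true, if_false, List.cons_append, List.foldl_cons, runScan]
      have hstep : gapStep (res, (i : Int) - 1 - run) i
          = (if run ≠ 0 then res ++ [(run : Int) + 1] else res, (i : Int)) := by
        unfold gapStep
        by_cases hr : run = 0
        · simp [hr]
        · have h1 : (i : Int) - ((i : Int) - 1 - run) > 1 := by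
            have : (0 : Int) < (run : Int) := by exact_mod_cast Nat.pos_of_ne_zero hr
            omega
          have h2 : (i : Int) - ((i : Int) - 1 - run) = (run : Int) + 1 := by ring
          simp [hr, h1, h2]
      rw [hstep]
      have := gapFold_eq_runScan aug n (i + 1)
        0 (if run ≠ 0 then res ++ [(run : Int) + 1] else res) (by omega) (by omega)
      have harith : ((i + 1 : Nat) : Int) - 1 - ((0 : Nat) : Int) = (i : Int) := by push_cast; ring
      rw [harith] at this
      rw [this]
      by_cases hr : run = 0 <;> simp [hr]
  · rw [brkList_nil aug n i h, flagList_nil aug n i h]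
    have hin' : i = n := by omega
    simp only [List.nil_append, List.foldl_cons, List.foldl_nil, runScan]
    unfold gapStep
    subst hin'
    by_cases hr : run = 0
    · have : ¬ ((i : Int) - ((i : Int) - 1 - run) > 1) := by
        simp [hr]
      simp [hr, this]
    · have h1 : (i : Int) - ((i : Int) - 1 - run) > 1 := by
        have : (0 : Int) < (run : Int) := by exact_mod_cast Nat.pos_of_ne_zero hr
        omega
      have h2 : (i : Int) - ((i : Int) - 1 - run) = (run : Int) + 1 := by ring
      have hp : 0 < run := Nat.pos_of_ne_zero hr
      simp [hr, h1, h2, hp]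
termination_by n - i
decreasing_by all_goals omega

-- ===== VERDICT (by name: the statement is the Claim_ definition above) =====
theorem consecutiveDecreasing_spec : Claim_equal_consecutiveDecreasing := by
  intro nums _
  unfold Spec_consecutiveDecreasing consecutiveDecreasing consecutiveDecreasing_alt
  have hA := cdOuter_eq (0 :: nums) (0 :: nums).length 0 [] (by omega)
  have hB := gapFold_eq_runScan (0 :: nums) (0 :: nums).length 0 0 [] (by omega) (by omega)
  simp only [] at hA hB ⊢
  rw [hA]
  have hbrk : (List.range (0 :: nums).length).filter (brkAt (0 :: nums))
      = brkList (0 :: nums) (0 :: nums).length 0 := by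
    unfold brkList
    rw [List.range_eq_range']
    simp
  rw [hbrk]
  have harith : ((0 : Nat) : Int) - 1 - ((0 : Nat) : Int) = (-1 : Int) := by norm_num
  rw [← harith, hB]
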